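-- pv_equiv track=rewrite | github.com/jgfranco/formation | stringSpeedDrill3.py | solution
-- ===== SOURCE A (Python) =====
-- def solution(string):
--
--     nstring = ""
--     spaces = 0
--     for i, char in enumerate(string):
--         if char == " ":
--             spaces +=1
--             nstring += char
--             continue
--         if (i+1-spaces) %2 != 0:
--             nstring += char.upper()
--         else:
--             nstring += char
--
--     return nstring
-- ===== SOURCE B (Python) =====
-- def solution(string):
--     # Stage 1: compact the string to its non-space characters.
--     core = [c for c in string if c != " "]
--     # Stage 2: uppercase every even-position character of the compacted string.
--     transformed = [c.upper() if i % 2 == 0 else c for i, c in enumerate(core)]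
--     # Stage 3: merge the transformed characters back into the space layout.
--     out = []
--     k = 0
--     for c in string:
--         if c == " ":
--             out.append(c)
--         else:
--             out.append(transformed[k])
--             k += 1
--     return "".join(out)
-- ===== Notes on version B (the rewrite author's own statement) =====
-- stated objective: alternative
-- what changed: Replaces A's single pass with index-minus-space-counter parity arithmetic by three staged passes: filter out spaces, uppercase the even positions of the compacted list, then merge the transformed characters back into the original space layout.
import Mathlib
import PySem

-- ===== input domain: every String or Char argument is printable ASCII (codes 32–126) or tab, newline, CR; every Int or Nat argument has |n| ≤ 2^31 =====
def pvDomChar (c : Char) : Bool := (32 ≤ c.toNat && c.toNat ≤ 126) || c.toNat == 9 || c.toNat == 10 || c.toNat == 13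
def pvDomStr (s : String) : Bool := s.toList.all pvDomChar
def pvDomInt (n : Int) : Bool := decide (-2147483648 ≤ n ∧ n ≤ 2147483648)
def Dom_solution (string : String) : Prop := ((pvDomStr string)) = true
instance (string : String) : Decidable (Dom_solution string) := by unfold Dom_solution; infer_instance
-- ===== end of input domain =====

-- B replaces A's index/space-counter parity arithmetic with three staged passes (filter spaces, uppercase even compacted positions, merge back); alternative decomposition, same O(n) cost.

-- ===== PORT A =====
-- the enumerate loop with state (nstring, spaces); uppercase when (i+1-spaces) % 2 != 0
def solution (string : String) : String :=
  (String.mk ((PySem.List.enumerate string.toList).foldl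
    (fun (st : List Char × Int) p =>
      if p.2 = ' ' then (st.1 ++ [p.2], st.2 + 1)
      else if PySem.Int.mod (p.1 + 1 - st.2) 2 ≠ 0 then (st.1 ++ [PySem.Chars.upperChar p.2], st.2)
      else (st.1 ++ [p.2], st.2)) ([], 0)).1)

-- ===== PORT B =====
-- Stage 3 of Source B: walk the original string, spaces pass through, non-space positions
-- take the next transformed character in order (Source B reads transformed[k], k += 1;
-- here the same sequential reads consume the list head by head).
-- The [] fallback is unreachable: the transformed list has one element per non-space char.
def solutionMerge : List Char → List Char → List Char
  | [], _ => []
  | c :: rest, ts =>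
    if c = ' ' then c :: solutionMerge rest ts
    else match ts with
      | t :: ts' => t :: solutionMerge rest ts'
      | [] => []

def solution_alt (string : String) : String :=
  -- Stage 1: filter; Stage 2: uppercase even enumerate-positions; Stage 3: merge back.
  String.mk (solutionMerge string.toList
    ((PySem.List.enumerate (string.toList.filter (fun c => c ≠ ' '))).map
      (fun p => if PySem.Int.mod p.1 2 = 0 then PySem.Chars.upperChar p.2 else p.2)))

-- ===== PRECONDITION & SPEC =====
def Spec_solution (string : String) (out : String) : Prop := out = solution_alt string
instance (string : String) (out : String) : Decidable (Spec_solution string out) := by unfold Spec_solution; infer_instance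

-- ===== CLAIM =====
def Claim_equal_solution : Prop := ∀ (string : String), Dom_solution string → Spec_solution string (solution string)

-- ===== LEMMAS AND PROOFS =====

-- common reference form: toggle over non-space characters
def pvToggle : List Char → Bool → List Char
  | [], _ => []
  | c :: rest, up =>
    if c = ' ' then c :: pvToggle rest up
    else (if up then PySem.Chars.upperChar c else c) :: pvToggle rest (!up)

theorem solution_go (l : List Char) : ∀ (s sp : Int) (acc : List Char),
    ((PySem.List.enumerate l s).foldl
      (fun (st : List Char × Int) p =>
        if p.2 = ' ' then (st.1 ++ [p.2], st.2 + 1)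
        else if PySem.Int.mod (p.1 + 1 - st.2) 2 ≠ 0 then (st.1 ++ [PySem.Chars.upperChar p.2], st.2)
        else (st.1 ++ [p.2], st.2)) (acc, sp)).1
    = acc ++ pvToggle l (decide (PySem.Int.mod (s + 1 - sp) 2 ≠ 0)) := by
  induction l with
  | nil => intro s sp acc; simp [PySem.List.enumerate, pvToggle]
  | cons c rest ih =>
    intro s sp acc
    rw [PySem.List.enumerate_cons]
    by_cases hc : c = ' '
    · simp only [List.foldl_cons, hc, if_true]
      rw [ih (s + 1) (sp + 1)]
      have : (s + 1 + 1 - (sp + 1)) = (s + 1 - sp) := by ring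
      simp [pvToggle, this]
    · have hfe : ∀ x : Int, PySem.Int.mod x 2 = x % 2 := by
        intro x; simp only [PySem.Int.mod]; rw [Int.fmod_eq_emod]; omega
      have hpar : (decide (PySem.Int.mod (s + 1 + 1 - sp) 2 ≠ 0))
          = !(decide (PySem.Int.mod (s + 1 - sp) 2 ≠ 0)) := by
        by_cases hz : PySem.Int.mod (s + 1 - sp) 2 = 0
        · have h1 : PySem.Int.mod (s + 1 + 1 - sp) 2 ≠ 0 := by
            rw [hfe] at hz ⊢; omega
          rw [hfe] at hz h1
          have h2 : (s + 1 + 1 - sp) % 2 = 1 := by omega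
          have h3 : ¬ ((s + 1 - sp) % 2 = 1) := by omega
          simp [h2, h3]
        · have h1 : PySem.Int.mod (s + 1 + 1 - sp) 2 = 0 := by
            rw [hfe] at hz ⊢; omega
          rw [hfe] at hz h1
          have h2 : ¬ ((s + 1 + 1 - sp) % 2 = 1) := by omega
          have h3 : (s + 1 - sp) % 2 = 1 := by omega
          simp [h2, h3]
      by_cases hm : PySem.Int.mod (s + 1 - sp) 2 ≠ 0
      · have hup : (decide (PySem.Int.mod (s + 1 - sp) 2 ≠ 0)) = true := by simpa using hm
        simp only [List.foldl_cons, hc, if_false, if_pos hm]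
        rw [ih (s + 1) sp, hpar, hup]
        simp [pvToggle, hc]
      · have hup : (decide (PySem.Int.mod (s + 1 - sp) 2 ≠ 0)) = false := by simpa using hm
        simp only [List.foldl_cons, hc, if_false, if_neg hm]
        rw [ih (s + 1) sp, hpar, hup]
        simp [pvToggle, hc]

theorem merge_go (l : List Char) : ∀ (i : Int), 0 ≤ i →
    solutionMerge l ((PySem.List.enumerate (l.filter (fun c => c ≠ ' ')) i).map
      (fun p => if PySem.Int.mod p.1 2 = 0 then PySem.Chars.upperChar p.2 else p.2))
    = pvToggle l (decide (PySem.Int.mod i 2 = 0)) := by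
  induction l with
  | nil => intro i _; simp [PySem.List.enumerate, solutionMerge, pvToggle]
  | cons c rest ih =>
    intro i hi
    by_cases hc : c = ' '
    · have hf : (c :: rest).filter (fun c => c ≠ ' ') = rest.filter (fun c => c ≠ ' ') := by
        simp [List.filter, hc]
      rw [hf]
      simp only [solutionMerge, pvToggle, hc, if_true]
      rw [ih i hi]
    · have hf : (c :: rest).filter (fun c => c ≠ ' ') = c :: rest.filter (fun c => c ≠ ' ') := by
        simp [List.filter, hc]
      rw [hf, PySem.List.enumerate_cons]
      simp only [List.map_cons, solutionMerge, pvToggle, hc, if_false]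
      rw [ih (i + 1) (by omega)]
      have hfe : ∀ x : Int, PySem.Int.mod x 2 = x % 2 := by
        intro x; simp only [PySem.Int.mod]; rw [Int.fmod_eq_emod]; omega
      have hpar : (decide (PySem.Int.mod (i + 1) 2 = 0)) = !(decide (PySem.Int.mod i 2 = 0)) := by
        rw [hfe, hfe]
        by_cases hz : i % 2 = 0
        · have : (i + 1) % 2 = 1 := by omega
          simp [this, hz]
        · have h1 : (i + 1) % 2 = 0 := by omega
          simp [h1, hz]
      rw [hpar]
      by_cases hz : PySem.Int.mod i 2 = 0 <;> simp [hz]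

-- ===== VERDICT =====
theorem solution_spec : Claim_equal_solution := by
  intro string _
  unfold Spec_solution solution solution_alt
  rw [solution_go string.toList 0 0 [],
    show (decide (PySem.Int.mod (0 + 1 - 0) 2 ≠ 0)) = true from by decide,
    merge_go string.toList 0 (by norm_num),
    show (decide (PySem.Int.mod (0:Int) 2 = 0)) = true from by decide]
  simp
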